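-- pv_equiv track=rewrite | github.com/linglingithub/myhello | misc/divide_two_integers.py | divide1
-- ===== SOURCE A (Python) =====
-- def divide1(dividend, divisor):  # good, 78ms
--     """
--     :type dividend: int
--     :type divisor: int
--     :rtype: int
--     """
--     INT_MAX = (1 << 31) - 1
--     if divisor == 0:
--         return INT_MAX
--     neg = dividend < 0 < divisor or dividend > 0 > divisor
--     ans = 0
--     shift = 0
--     a, b = abs(dividend), abs(divisor)
--     while (b << 1) <= a:
--         shift += 1
--         b <<= 1
--     while shift >= 0: # should be >= 0, not > 0 here
--         if a >= b:
--             a -= b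
--             ans += (1 << shift)
--         shift -= 1
--         b >>= 1
--
--     if neg:
--         ans = 0 - ans
--         if ans < 0 - INT_MAX - 1:
--             ans = 0 - INT_MAX - 1
--     else:
--         if ans > INT_MAX:
--             ans = INT_MAX
--     return ans
-- ===== SOURCE B (Python) =====
-- def divide1(dividend, divisor):
--     INT_MAX = (1 << 31) - 1
--     if divisor == 0:
--         return INT_MAX
--     neg = dividend < 0 < divisor or dividend > 0 > divisor
--     q = abs(dividend) // abs(divisor)
--     if neg:
--         return max(-q, -INT_MAX - 1)
--     return min(q, INT_MAX)
-- ===== Notes on version B (the rewrite author's own statement) =====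
-- stated objective: simpler
-- what changed: Replaces the two bit-shift long-division loops with a single built-in floor division of the absolute values, then applies the same sign and clamp rules via max/min.
import Mathlib
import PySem

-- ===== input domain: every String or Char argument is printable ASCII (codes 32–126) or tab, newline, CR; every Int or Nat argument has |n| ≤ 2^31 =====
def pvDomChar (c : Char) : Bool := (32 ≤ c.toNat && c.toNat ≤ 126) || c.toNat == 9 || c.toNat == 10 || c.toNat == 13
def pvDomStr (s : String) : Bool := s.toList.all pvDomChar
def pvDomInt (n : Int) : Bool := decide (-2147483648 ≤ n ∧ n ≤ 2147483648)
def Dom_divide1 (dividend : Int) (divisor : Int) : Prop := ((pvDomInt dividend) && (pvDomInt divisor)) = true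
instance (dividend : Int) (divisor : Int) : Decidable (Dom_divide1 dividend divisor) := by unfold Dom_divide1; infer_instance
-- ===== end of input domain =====

-- B replaces A's two bit-shift long-division loops by one built-in floor division
-- of the absolute values, keeping A's sign rule and clamps (objective: simpler).


-- ===== PORT A =====
-- first while loop: `while (b << 1) <= a: shift += 1; b <<= 1`
-- (b << 1 ported as b * 2, exact; the extra `1 ≤ b` in the guard only makes the
--  loop total — every call reached from divide1 has b = |divisor| ≥ 1, and with
--  b ≤ 0 the Python loop would not terminate anyway)
def divide1Loop1 (a b shift : Int) : Int × Int :=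
  if h : 1 ≤ b ∧ b * 2 ≤ a then divide1Loop1 a (b * 2) (shift + 1) else (shift, b)
termination_by (a - b).toNat
decreasing_by omega

-- second while loop: `while shift >= 0: if a >= b: a -= b; ans += (1 << shift); shift -= 1; b >>= 1`
-- (1 << shift ported as 2 ^ shift.toNat — exact since shift ≥ 0 inside the loop;
--  b >> 1 ported as floor division by 2, exact for every int)
def divide1Loop2 (a b shift ans : Int) : Int :=
  if h : 0 ≤ shift then
    if b ≤ a then
      divide1Loop2 (a - b) (PySem.Int.floordiv b 2) (shift - 1) (ans + 2 ^ shift.toNat)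
    else
      divide1Loop2 a (PySem.Int.floordiv b 2) (shift - 1) ans
  else ans
termination_by (shift + 1).toNat
decreasing_by all_goals omega

def divide1 (dividend : Int) (divisor : Int) : Int :=
  let INT_MAX : Int := 2 ^ 31 - 1   -- (1 << 31) - 1
  if divisor = 0 then INT_MAX
  else
    -- neg = dividend < 0 < divisor or dividend > 0 > divisor
    let p := divide1Loop1 |dividend| |divisor| 0
    let ans := divide1Loop2 |dividend| p.2 p.1 0
    if (dividend < 0 ∧ 0 < divisor) ∨ (dividend > 0 ∧ 0 > divisor) then
      let ans := 0 - ans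
      if ans < 0 - INT_MAX - 1 then 0 - INT_MAX - 1 else ans
    else
      if ans > INT_MAX then INT_MAX else ans

-- ===== PORT B =====
def divide1_alt (dividend : Int) (divisor : Int) : Int :=
  let INT_MAX : Int := 2 ^ 31 - 1   -- (1 << 31) - 1
  if divisor = 0 then INT_MAX
  else
    let q := PySem.Int.floordiv |dividend| |divisor|
    if (dividend < 0 ∧ 0 < divisor) ∨ (dividend > 0 ∧ 0 > divisor) then
      max (-q) (-INT_MAX - 1)
    else
      min q INT_MAX

-- ===== PRECONDITION & SPEC =====
def Spec_divide1 (dividend : Int) (divisor : Int) (out : Int) : Prop := out = divide1_alt dividend divisor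
instance (dividend : Int) (divisor : Int) (out : Int) : Decidable (Spec_divide1 dividend divisor out) := by unfold Spec_divide1; infer_instance

-- ===== CLAIM (what is proved, stated in full; the proofs are below) =====
def Claim_equal_divide1 : Prop := ∀ (dividend : Int) (divisor : Int), Dom_divide1 dividend divisor → Spec_divide1 dividend divisor (divide1 dividend divisor)

-- ===== LEMMAS AND PROOFS =====

-- Loop 1 doubles b until 2*b > a, counting the doublings into shift.
theorem divide1Loop1_spec (a b shift : Int) (hb : 1 ≤ b) :
    ∃ k : Nat, divide1Loop1 a b shift = (shift + k, b * 2 ^ k) ∧ a < b * 2 ^ k * 2 := by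
  revert hb
  induction b, shift using divide1Loop1.induct a with
  | case1 b shift h ih =>
      intro _
      obtain ⟨k, hk, hlt⟩ := ih (by omega)
      refine ⟨k + 1, ?_, ?_⟩
      · rw [divide1Loop1, dif_pos h, hk]
        refine Prod.ext ?_ ?_ <;> simp <;> [push_cast; skip] <;> ring
      · calc a < b * 2 * 2 ^ k * 2 := hlt
          _ = b * 2 ^ (k + 1) * 2 := by ring
  | case2 b shift h =>
      intro hb
      refine ⟨0, ?_, ?_⟩
      · rw [divide1Loop1, dif_neg h]; simp
      · simp only [pow_zero, mul_one]; omega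

-- Loop 2, entered with b = b0 * 2^n and 0 ≤ a < 2*b, adds ⌊a / b0⌋ to ans.
theorem divide1Loop2_spec (n : Nat) : ∀ (a ans b0 : Int), 1 ≤ b0 → 0 ≤ a →
    a < b0 * 2 ^ n * 2 →
    divide1Loop2 a (b0 * 2 ^ n) (n : Int) ans = ans + PySem.Int.floordiv a b0 := by
  induction n with
  | zero =>
      intro a ans b0 hb0 ha hlt
      simp only [pow_zero, mul_one] at hlt ⊢
      rw [divide1Loop2, dif_pos (by omega : (0:Int) ≤ (0:Nat))]
      by_cases hc : b0 ≤ a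
      · rw [if_pos hc, divide1Loop2, dif_neg (by norm_num)]
        have : PySem.Int.floordiv a b0 = 1 :=
          (PySem.Int.floordiv_eq_iff_of_pos (by omega)).2 (by constructor <;> omega)
        simp [this]
      · rw [if_neg hc, divide1Loop2, dif_neg (by norm_num)]
        have : PySem.Int.floordiv a b0 = 0 :=
          (PySem.Int.floordiv_eq_iff_of_pos (by omega)).2 (by constructor <;> omega)
        simp [this]
  | succ n ih =>
      intro a ans b0 hb0 ha hlt
      have hbpos : (0:Int) < b0 * 2 ^ n := by positivity
      have hhalf : PySem.Int.floordiv (b0 * 2 ^ (n + 1)) 2 = b0 * 2 ^ n := by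
        rw [PySem.Int.floordiv_eq_ediv_of_pos (by norm_num)]
        rw [(by ring : b0 * 2 ^ (n + 1) = b0 * 2 ^ n * 2)]
        exact Int.mul_ediv_cancel _ (by norm_num)
      have hshift : ((n + 1 : Nat) : Int) - 1 = (n : Int) := by push_cast; ring
      have hpow : b0 * 2 ^ (n + 1) = b0 * 2 ^ n * 2 := by ring
      have htn : ((n + 1 : Nat) : Int).toNat = n + 1 := by omega
      rw [divide1Loop2, dif_pos (by omega : (0:Int) ≤ ((n + 1 : Nat) : Int))]
      by_cases hc : b0 * 2 ^ (n + 1) ≤ a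
      · rw [if_pos hc, hhalf, hshift, htn,
          ih (a - b0 * 2 ^ (n + 1)) _ b0 hb0 (by omega) (by omega)]
        have key : PySem.Int.floordiv a b0
            = PySem.Int.floordiv (a - b0 * 2 ^ (n + 1)) b0 + 2 ^ (n + 1) := by
          rw [PySem.Int.floordiv_eq_ediv_of_pos (by omega),
              PySem.Int.floordiv_eq_ediv_of_pos (by omega)]
          have := Int.add_mul_ediv_right (a - b0 * 2 ^ (n + 1)) (2 ^ (n + 1)) (by omega : b0 ≠ 0)
          rw [(by ring : a - b0 * 2 ^ (n + 1) + 2 ^ (n + 1) * b0 = a)] at this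
          omega
        omega
      · rw [if_neg hc, hhalf, hshift,
          ih a ans b0 hb0 ha (by omega)]

-- The two loops together compute ⌊|dividend| / |divisor|⌋.
theorem divide1_loops_floordiv (dividend divisor : Int) (hd : divisor ≠ 0) :
    divide1Loop2 |dividend| (divide1Loop1 |dividend| |divisor| 0).2
      (divide1Loop1 |dividend| |divisor| 0).1 0
    = PySem.Int.floordiv |dividend| |divisor| := by
  obtain ⟨k, hk, hlt⟩ :=
    divide1Loop1_spec |dividend| |divisor| 0 (Int.one_le_abs hd)
  rw [hk]
  simpa using divide1Loop2_spec k |dividend| 0 |divisor| (Int.one_le_abs hd) (abs_nonneg _) hlt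

-- ===== VERDICT (by name: the statement is the Claim_ definition above) =====
theorem divide1_spec : Claim_equal_divide1 := by
  intro dividend divisor _
  unfold Spec_divide1 divide1 divide1_alt
  by_cases h0 : divisor = 0
  · simp [h0]
  · simp only [if_neg h0]
    rw [divide1_loops_floordiv dividend divisor h0]
    split_ifs <;> omega
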